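-- pv_equiv track=rewrite | github.com/pypi-data/pypi-mirror-2 | packages/syzygy/syzygy-0.9.5.45-py2.5.egg/syzygy/SAMpileuphelper.py | returnnonrefcount
-- ===== SOURCE A (Python) =====
-- def returnnonrefcount(allele_list):
--     nonrefcount = 0
--     for i in range(0,len(allele_list)):
--         if allele_list[i] == ',':
--             nonrefcount += 0
--         elif allele_list[i] == '.':
--             nonrefcount += 0
--         else:
--             nonrefcount += 1
--     return nonrefcount
-- ===== SOURCE B (Python) =====
-- def returnnonrefcount(allele_list):
--     return len(allele_list) - allele_list.count(',') - allele_list.count('.')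
-- ===== Notes on version B (the rewrite author's own statement) =====
-- stated objective: simpler
-- what changed: Replaces the indexed loop with a per-element if/elif classification by an arithmetic identity: length minus the aggregate counts of ',' and '.'.
import Mathlib
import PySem

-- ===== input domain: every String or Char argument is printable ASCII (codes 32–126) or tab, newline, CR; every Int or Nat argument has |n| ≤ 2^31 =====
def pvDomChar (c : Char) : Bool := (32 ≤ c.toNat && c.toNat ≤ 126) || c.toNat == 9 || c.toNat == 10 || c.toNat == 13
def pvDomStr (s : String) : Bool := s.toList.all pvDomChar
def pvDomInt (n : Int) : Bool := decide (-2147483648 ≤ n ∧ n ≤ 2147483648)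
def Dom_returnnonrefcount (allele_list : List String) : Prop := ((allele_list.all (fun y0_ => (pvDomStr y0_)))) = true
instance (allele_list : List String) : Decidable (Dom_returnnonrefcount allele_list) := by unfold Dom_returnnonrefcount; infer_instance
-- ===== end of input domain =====

-- ===== PORT A =====
-- B replaces A's indexed loop (if/elif classifying each element) by length minus the
-- aggregate counts of ',' and '.'; objective: simpler.
def returnnonrefcount (allele_list : List String) : Int :=
  (PySem.List.pyRange 0 (PySem.List.len allele_list) 1).foldl
    (fun nonrefcount i =>
      if PySem.List.pyGetD allele_list i "" = "," then nonrefcount + 0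
      else if PySem.List.pyGetD allele_list i "" = "." then nonrefcount + 0
      else nonrefcount + 1) 0

-- ===== PORT B =====
def returnnonrefcount_alt (allele_list : List String) : Int :=
  (allele_list.length : Int) - (PySem.List.count allele_list ",") - (PySem.List.count allele_list ".")

-- ===== PRECONDITION & SPEC =====
def Spec_returnnonrefcount (allele_list : List String) (out : Int) : Prop := out = returnnonrefcount_alt allele_list
instance (allele_list : List String) (out : Int) : Decidable (Spec_returnnonrefcount allele_list out) := by unfold Spec_returnnonrefcount; infer_instance

-- ===== CLAIM (what is proved, stated in full; the proofs are below) =====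
def Claim_equal_returnnonrefcount : Prop := ∀ (allele_list : List String), Dom_returnnonrefcount allele_list → Spec_returnnonrefcount allele_list (returnnonrefcount allele_list)

-- ===== LEMMAS AND PROOFS =====

-- ===== VERDICT (by name: the statement is the Claim_ definition above) =====
lemma rnc_foldl (xs : List String) (n : Int) :
    xs.foldl (fun nonrefcount a =>
        if a = "," then nonrefcount + 0
        else if a = "." then nonrefcount + 0
        else nonrefcount + 1) n
      = n + (xs.length : Int) - (xs.count ",") - (xs.count ".") := by
  induction xs generalizing n with
  | nil => simp
  | cons x xs ih =>
    simp only [List.foldl_cons, List.length_cons, List.count_cons]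
    rw [ih]
    by_cases h1 : x = "," <;> by_cases h2 : x = "." <;>
      simp [h1, h2] <;> omega

theorem returnnonrefcount_spec : Claim_equal_returnnonrefcount := by
  intro allele_list _
  unfold Spec_returnnonrefcount returnnonrefcount returnnonrefcount_alt
  rw [show PySem.List.len allele_list = (allele_list.length : Int) from rfl,
      PySem.List.foldl_pyRange_zero_pyGetD' allele_list ""
        (fun nonrefcount a =>
          if a = "," then nonrefcount + 0
          else if a = "." then nonrefcount + 0
          else nonrefcount + 1) 0,
      rnc_foldl]
  simp [PySem.List.count]
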